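-- pv_equiv track=rewrite | github.com/512/py | sqrt/sqrty.py | group_into_pairs
-- ===== SOURCE A (Python) =====
-- DECIMAL_POINT = '.'
--
-- def odd_length(lst):
--     return 1 == len(lst) % 2
--
-- def group_into_pairs(n):
--     """
--     Given: n, the number to compute the square root of
--     Return: a list of the digits of n, with decimal point, and leading or trailing zeroes, if needed.
--
--     Add decimal point to end if missing.
--     Separate the digits of n into pairs, starting from the decimal point and going left and right.
--     Prepend or append with 0 if needed to ensure groups of two.
--     Return list of ea
--
--     Examples:
--     5 -> 0 5 .
--     15 -> 1 5 .
--     153 -> 0 1 5 3 .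
--     3.145 -> 0 3 . 1 4 5 0
--     """
--
--     lst = [d for d in str(n)]
--     if DECIMAL_POINT not in lst:
--         lst.append(DECIMAL_POINT)
--     p = lst.index(DECIMAL_POINT)
--     before = lst[0:p]
--     after = lst[p+1:]
--     if odd_length(before):
--         lst.insert(0, str(0))
--     if odd_length(after):
--         lst.append(str(0))
--     return lst
-- ===== SOURCE B (Python) =====
-- DECIMAL_POINT = '.'
--
-- def _pairs_from_right(s):
--     """Consume s in two-char groups anchored at the RIGHT end, walking inward;
--     a lone leftover char at the far left becomes the group '0'+char.
--     Groups are collected right-to-left, then emitted in left-to-right order."""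
--     groups = []
--     j = len(s)
--     while j >= 2:
--         groups.append([s[j - 2], s[j - 1]])
--         j -= 2
--     if j == 1:
--         groups.append(['0', s[0]])
--     out = []
--     for g in reversed(groups):
--         out += g
--     return out
--
-- def _pairs_from_left(s):
--     """Consume s in two-char groups anchored at the LEFT end, walking right;
--     a lone leftover char at the far right becomes the group char+'0'."""
--     out = []
--     i = 0
--     while i + 2 <= len(s):
--         out.append(s[i])
--         out.append(s[i + 1])
--         i += 2
--     if i < len(s):
--         out.append(s[i])
--         out.append('0')
--     return out
--
-- def group_into_pairs(n):
--     """Consume two-digit groups outward from the first decimal point: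
--     the integer part right-to-left, the fraction left-to-right; padding appears
--     only when a group is left incomplete."""
--     int_part, _, frac_part = str(n).partition(DECIMAL_POINT)
--     return _pairs_from_right(int_part) + [DECIMAL_POINT] + _pairs_from_left(frac_part)
-- ===== Notes on version B (the rewrite author's own statement) =====
-- stated objective: alternative
-- what changed: B replaces A's build-one-list/locate-index/slice/mutate-with-parity-checks scheme by two index loops that consume two-char groups outward from the first decimal point (integer part right-to-left collecting groups then reversed, fraction left-to-right); padding is not computed from a parity test but emerges when a lone char remains at the loop's end.
import Mathlib
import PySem

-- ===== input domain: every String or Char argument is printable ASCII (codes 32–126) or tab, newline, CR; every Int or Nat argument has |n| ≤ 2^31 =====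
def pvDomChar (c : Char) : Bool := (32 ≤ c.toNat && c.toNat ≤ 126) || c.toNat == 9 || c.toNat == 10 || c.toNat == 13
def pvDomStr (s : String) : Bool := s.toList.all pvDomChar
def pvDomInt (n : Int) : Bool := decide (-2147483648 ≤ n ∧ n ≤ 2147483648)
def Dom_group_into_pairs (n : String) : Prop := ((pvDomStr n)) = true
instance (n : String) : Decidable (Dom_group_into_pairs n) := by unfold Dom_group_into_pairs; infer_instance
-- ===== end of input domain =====

-- B consumes two-char groups outward from the first decimal point with index loops (integer part
-- right-to-left, fraction left-to-right); padding appears only when a group is left incomplete.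

-- ===== PORT A =====
-- A's body over the chars of str(n); [d for d in str(n)] is the map to one-char strings
def groupIntoPairsACore (s : List Char) : List String :=
  let lst := s.map (fun c => String.singleton c)
  let lst := if "." ∈ lst then lst else lst ++ ["."]
  -- lst.index('.'): '.' is always present here, so index? is some and getD 0 never takes the default
  let p := (PySem.List.index? lst ".").getD 0
  let before := PySem.List.slice lst (some 0) (some (p : Int))
  let after := PySem.List.slice lst (some ((p : Int) + 1)) none
  let lst := if before.length % 2 == 1 then PySem.List.insert lst 0 "0" else lst
  let lst := if after.length % 2 == 1 then lst ++ ["0"] else lst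
  lst

def group_into_pairs (n : String) : List String := groupIntoPairsACore n.toList

-- ===== PORT B =====
-- _pairs_from_right: while j >= 2 collect [s[j-2], s[j-1]] right-to-left, lone s[0] padded
-- with a leading '0'; then 'for g in reversed(groups): out += g' is flatten of the reverse
def pairsRightLoop (s : List Char) (j : Nat) (groups : List (List String)) : List (List String) :=
  if 2 ≤ j then
    pairsRightLoop s (j - 2) (groups ++ [[String.singleton s[j - 2]!, String.singleton s[j - 1]!]])
  else if j = 1 then groups ++ [["0", String.singleton s[0]!]]
  else groups
termination_by j
decreasing_by omega

def pairsRight (s : List Char) : List String :=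
  ((pairsRightLoop s s.length []).reverse).flatten

-- _pairs_from_left: while i + 2 <= len append s[i], s[i+1]; lone trailing char padded with '0'
def pairsLeftLoop (s : List Char) (i : Nat) (out : List String) : List String :=
  if i + 2 ≤ s.length then
    pairsLeftLoop s (i + 2) (out ++ [String.singleton s[i]!, String.singleton s[i + 1]!])
  else if i < s.length then out ++ [String.singleton s[i]!, "0"]
  else out
termination_by s.length - i
decreasing_by omega

def pairsLeft (s : List Char) : List String := pairsLeftLoop s 0 []

-- str.partition('.') splits at the FIRST '.', ported exactly as takeWhile/dropWhile
def groupIntoPairsBCore (s : List Char) : List String :=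
  let intPart := s.takeWhile (fun c => c ≠ '.')
  let fracPart := (s.dropWhile (fun c => c ≠ '.')).drop 1
  pairsRight intPart ++ ["."] ++ pairsLeft fracPart

def group_into_pairs_alt (n : String) : List String := groupIntoPairsBCore n.toList

-- ===== PRECONDITION & SPEC =====
def Spec_group_into_pairs (n : String) (out : List String) : Prop := out = group_into_pairs_alt n
instance (n : String) (out : List String) : Decidable (Spec_group_into_pairs n out) := by unfold Spec_group_into_pairs; infer_instance

-- ===== CLAIM (what is proved, stated in full; the proofs are below) =====
def Claim_equal_group_into_pairs : Prop := ∀ (n : String), Dom_group_into_pairs n → Spec_group_into_pairs n (group_into_pairs n)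

-- ===== LEMMAS AND PROOFS =====

theorem singleton_dot : String.singleton '.' = "." := rfl

theorem singleton_eq_dot_iff (c : Char) : (String.singleton c = ".") ↔ c = '.' := by
  constructor
  · intro h
    have := congrArg String.toList h
    simpa [String.singleton] using this
  · rintro rfl; rfl

theorem not_mem_map_singleton_dot {t : List Char} (h : '.' ∉ t) :
    "." ∉ t.map (fun c => String.singleton c) := by
  intro hm
  rcases List.mem_map.mp hm with ⟨c, hc, hs⟩
  exact h ((singleton_eq_dot_iff c).mp hs ▸ hc)

theorem split_at_dot : ∀ (l : List Char), '.' ∈ l → ∃ t r, l = t ++ '.' :: r ∧ '.' ∉ t := by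
  intro l hm
  induction l with
  | nil => simp at hm
  | cons a l ih =>
    by_cases ha : a = '.'
    · exact ⟨[], l, by simp [ha], by simp⟩
    · have hm' : '.' ∈ l := by
        rcases List.mem_cons.mp hm with h | h
        · exact absurd h.symm ha
        · exact h
      obtain ⟨t, r, rfl, hnt⟩ := ih hm'
      refine ⟨a :: t, r, rfl, ?_⟩
      intro hc
      rcases List.mem_cons.mp hc with h | h
      · exact ha h.symm
      · exact hnt h

theorem takeWhile_split {t : List Char} (r : List Char) (h : '.' ∉ t) :
    (t ++ '.' :: r).takeWhile (fun c => c ≠ '.') = t := by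
  induction t with
  | nil => simp
  | cons a t ih =>
    have ha : a ≠ '.' := fun hc => h (hc ▸ List.mem_cons_self)
    rw [List.cons_append, List.takeWhile_cons_of_pos (by simpa using ha),
      ih (fun hc => h (List.mem_cons_of_mem a hc))]

theorem dropWhile_split {t : List Char} (r : List Char) (h : '.' ∉ t) :
    (t ++ '.' :: r).dropWhile (fun c => c ≠ '.') = '.' :: r := by
  induction t with
  | nil => simp
  | cons a t ih =>
    have ha : a ≠ '.' := fun hc => h (hc ▸ List.mem_cons_self)
    rw [List.cons_append, List.dropWhile_cons_of_pos (by simpa using ha),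
      ih (fun hc => h (List.mem_cons_of_mem a hc))]

-- loop invariant for _pairs_from_right: groups collected for indices below j, reversed and flattened
theorem pairsRightLoop_eq (s : List Char) : ∀ (j : Nat), j ≤ s.length → ∀ (groups : List (List String)),
    (pairsRightLoop s j groups).reverse.flatten
      = (if j % 2 = 1 then ["0"] else []) ++ (s.take j).map (fun c => String.singleton c)
        ++ groups.reverse.flatten := by
  intro j
  induction j using Nat.strong_induction_on with
  | _ j ih =>
    intro hj groups
    rw [pairsRightLoop]
    by_cases h2 : 2 ≤ j
    · rw [if_pos h2]
      obtain ⟨k, rfl⟩ : ∃ k, j = k + 2 := ⟨j - 2, by omega⟩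
      have hk1 : k + 1 < s.length := by omega
      have hk : k < s.length := by omega
      have htake : s.take (k + 2) = s.take k ++ [s[k], s[k + 1]] := by
        rw [List.take_add_one (l := s) (i := k + 1), List.take_add_one (l := s) (i := k),
          List.getElem?_eq_getElem hk, List.getElem?_eq_getElem hk1]
        simp only [Option.toList_some, List.append_assoc, List.singleton_append]
      rw [show k + 2 - 2 = k by omega] at *
      rw [ih k (by omega) (by omega)]
      simp only [getElem!_pos s k hk, htake, List.map_append,
        List.reverse_append, List.flatten_append]
      have hpar : k % 2 = (k + 2) % 2 := by omega
      rw [← hpar]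
      split_ifs <;> simp [List.getElem?_eq_getElem hk1]
    · rw [if_neg h2]
      by_cases h1 : j = 1
      · subst h1
        have h0 : 0 < s.length := by omega
        rw [if_pos rfl]
        have htake : s.take 1 = [s[0]] := by
          rw [List.take_add_one, List.take_zero, List.getElem?_eq_getElem h0]; simp
        simp [getElem!_pos s 0 h0, htake]
      · have h0 : j = 0 := by omega
        subst h0
        simp
-- closed characterisation of _pairs_from_right
theorem pairsRight_eq (s : List Char) :
    pairsRight s = (if s.length % 2 = 1 then ["0"] else []) ++ s.map (fun c => String.singleton c) := by
  rw [pairsRight, pairsRightLoop_eq s s.length le_rfl []]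
  simp

-- loop invariant for _pairs_from_left: output extended with the groups from index i on
theorem pairsLeftLoop_eq (s : List Char) : ∀ (d i : Nat), d = s.length - i → ∀ (out : List String),
    pairsLeftLoop s i out
      = out ++ (s.drop i).map (fun c => String.singleton c)
        ++ (if (s.length - i) % 2 = 1 then ["0"] else []) := by
  intro d
  induction d using Nat.strong_induction_on with
  | _ d ih =>
    intro i hd out
    rw [pairsLeftLoop]
    by_cases h2 : i + 2 ≤ s.length
    · rw [if_pos h2]
      have hi : i < s.length := by omega
      have hi1 : i + 1 < s.length := by omega
      have hdrop : (s.drop i).map (fun c => String.singleton c)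
          = String.singleton s[i] :: String.singleton s[i + 1]
            :: (s.drop (i + 2)).map (fun c => String.singleton c) := by
        rw [List.drop_eq_getElem_cons hi, List.drop_eq_getElem_cons hi1]
        rfl
      rw [ih (s.length - (i + 2)) (by omega) (i + 2) rfl, getElem!_pos s i hi,
        getElem!_pos s (i + 1) hi1, hdrop,
        show (s.length - (i + 2)) % 2 = (s.length - i) % 2 by omega]
      simp
    · rw [if_neg h2]
      by_cases h1 : i < s.length
      · have hlen : s.length = i + 1 := by omega
        rw [if_pos h1]
        have hdrop : s.drop i = [s[i]] := by
          rw [List.drop_eq_getElem_cons h1,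
            List.drop_eq_nil_of_le (by omega : s.length ≤ i + 1)]
        simp [hdrop, hlen]
      · rw [if_neg h1]
        have hnil : s.drop i = [] := List.drop_eq_nil_of_le (by omega)
        simp [hnil, show s.length - i = 0 by omega]

-- closed characterisation of _pairs_from_left
theorem pairsLeft_eq (s : List Char) :
    pairsLeft s = s.map (fun c => String.singleton c) ++ (if s.length % 2 = 1 then ["0"] else []) := by
  rw [pairsLeft, pairsLeftLoop_eq s s.length 0 rfl []]
  simp

theorem core_lemma (l : List Char) : groupIntoPairsACore l = groupIntoPairsBCore l := by
  by_cases hm : '.' ∈ l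
  · obtain ⟨t, r, rfl, hnt⟩ := split_at_dot l hm
    have hmap : (t ++ '.' :: r).map (fun c => String.singleton c)
        = t.map (fun c => String.singleton c) ++ "." :: r.map (fun c => String.singleton c) := by
      simp [singleton_dot]
    have hmem : "." ∈ (t ++ '.' :: r).map (fun c => String.singleton c) := by
      rw [hmap]; exact List.mem_append_right _ List.mem_cons_self
    have hidx : PySem.List.index? ((t ++ '.' :: r).map (fun c => String.singleton c)) "."
        = some t.length :=
      (PySem.List.index?_eq_some_iff _ _ _).mpr
        ⟨t.map (fun c => String.singleton c), r.map (fun c => String.singleton c),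
          by rw [hmap], by simp, not_mem_map_singleton_dot hnt⟩
    have hfrom : PySem.List.slice ((t ++ '.' :: r).map (fun c => String.singleton c))
        (some ((t.length : Int) + 1)) none = r.map (fun c => String.singleton c) := by
      rw [show ((t.length : Int) + 1) = ((t.length + 1 : Nat) : Int) by push_cast; ring,
        PySem.List.slice_from_natCast, hmap,
        show t.map (fun c => String.singleton c) ++ "." :: r.map (fun c => String.singleton c)
            = (t.map (fun c => String.singleton c) ++ ["."]) ++ r.map (fun c => String.singleton c) by simp,
        List.drop_left' (by simp)]
    have htake : ((t ++ '.' :: r).map (fun c => String.singleton c)).take t.length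
        = t.map (fun c => String.singleton c) := by
      rw [hmap, List.take_left' (by simp)]
    unfold groupIntoPairsACore groupIntoPairsBCore
    simp only [if_pos hmem, hidx, Option.getD_some, PySem.List.slice_zero_start,
      PySem.List.slice_to_natCast, hfrom, htake, takeWhile_split r hnt, dropWhile_split r hnt,
      List.drop_one, List.tail_cons, List.length_map, pairsRight_eq, pairsLeft_eq]
    split_ifs <;> simp_all [PySem.List.insert_zero]
  · have hnm : "." ∉ l.map (fun c => String.singleton c) := not_mem_map_singleton_dot hm
    have hidx : PySem.List.index? (l.map (fun c => String.singleton c) ++ ["."]) "."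
        = some l.length :=
      (PySem.List.index?_eq_some_iff _ _ _).mpr
        ⟨l.map (fun c => String.singleton c), [], rfl, by simp, hnm⟩
    have htw : l.takeWhile (fun c => c ≠ '.') = l := by
      rw [List.takeWhile_eq_self_iff]
      intro a ha
      simp only [ne_eq, decide_eq_true_eq]
      intro hc; subst hc; exact hm ha
    have hdw : l.dropWhile (fun c => c ≠ '.') = [] := by
      rw [List.dropWhile_eq_nil_iff]
      intro a ha
      simp only [ne_eq, decide_eq_true_eq]
      intro hc; subst hc; exact hm ha
    have hfrom : PySem.List.slice (l.map (fun c => String.singleton c) ++ ["."])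
        (some ((l.length : Int) + 1)) none = [] := by
      rw [show ((l.length : Int) + 1) = ((l.length + 1 : Nat) : Int) by push_cast; ring,
        PySem.List.slice_from_natCast]
      exact List.drop_eq_nil_of_le (by simp)
    have htake : (l.map (fun c => String.singleton c) ++ ["."]).take l.length
        = l.map (fun c => String.singleton c) :=
      List.take_left' (by simp)
    unfold groupIntoPairsACore groupIntoPairsBCore
    simp only [if_neg hnm, hidx, Option.getD_some, PySem.List.slice_zero_start,
      PySem.List.slice_to_natCast, hfrom, htake, htw, hdw, List.drop_nil,
      List.length_map, List.length_nil, pairsRight_eq, pairsLeft_eq]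
    split_ifs <;> simp_all [PySem.List.insert_zero]

-- ===== VERDICT (by name: the statement is the Claim_ definition above) =====
theorem group_into_pairs_spec : Claim_equal_group_into_pairs := by
  intro n _
  unfold Spec_group_into_pairs group_into_pairs group_into_pairs_alt
  exact core_lemma n.toList
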